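-- pv_equiv track=rewrite | github.com/Mr-r00t11/BSQLi | BSQLi.py | extract_cookie_parameters
-- ===== SOURCE A (Python) =====
-- def extract_cookie_parameters(headers):
--     """Extract cookie parameters"""
--     cookies = headers.get('Cookie', '')
--     if cookies:
--         cookie_params = []
--         cookie_pairs = cookies.split(';')
--         for pair in cookie_pairs:
--             if '=' in pair:
--                 key = pair.split('=')[0].strip()
--                 cookie_params.append(f"cookie:{key}")
--         return cookie_params
--     return []
-- ===== SOURCE B (Python) =====
-- def extract_cookie_parameters(headers):
--     """Extract cookie parameters (single-pass state machine over the cookie string)."""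
--     cookies = headers.get('Cookie', '')
--     out = []
--     key = ""
--     seen_eq = False
--     for ch in cookies:
--         if ch == ';':
--             if seen_eq:
--                 out.append("cookie:" + key.strip())
--             key = ""
--             seen_eq = False
--         elif ch == '=':
--             seen_eq = True
--         elif not seen_eq:
--             key += ch
--     if seen_eq:
--         out.append("cookie:" + key.strip())
--     return out
-- ===== Notes on version B (the rewrite author's own statement) =====
-- stated objective: alternative
-- what changed: A splits the cookie string on ';' and then re-splits each pair on '=' (two nested passes over slices); B is a single left-to-right character state machine over the raw string that accumulates the key until the first '=' and flushes at ';'/end, never materialising the segments.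
import Mathlib
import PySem

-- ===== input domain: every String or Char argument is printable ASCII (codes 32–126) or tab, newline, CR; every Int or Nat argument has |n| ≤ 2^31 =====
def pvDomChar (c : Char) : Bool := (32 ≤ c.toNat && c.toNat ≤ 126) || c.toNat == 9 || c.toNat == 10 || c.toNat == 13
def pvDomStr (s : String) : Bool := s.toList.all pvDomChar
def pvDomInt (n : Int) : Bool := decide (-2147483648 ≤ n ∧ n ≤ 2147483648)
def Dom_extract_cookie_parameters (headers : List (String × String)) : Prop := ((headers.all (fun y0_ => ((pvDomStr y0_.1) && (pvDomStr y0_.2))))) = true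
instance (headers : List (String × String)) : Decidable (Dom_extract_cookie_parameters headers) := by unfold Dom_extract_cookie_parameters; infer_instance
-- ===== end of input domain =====

-- B replaces A's split-on-';' / split-on-'=' double pass by a single-pass character
-- state machine over the cookie string (objective: alternative decomposition, same cost).

-- ===== PORT A =====
def extract_cookie_parameters (headers : List (String × String)) : List String :=
  let cookies := PySem.Dict.getD (PySem.Dict.ofList headers) "Cookie" ""
  if cookies ≠ "" then
    (PySem.Chars.splitOn cookies.toList [';']).foldl
      (fun acc pair =>
        if PySem.Chars.isIn ['='] pair then
          acc ++ [String.ofList ("cookie:".toList ++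
            PySem.Chars.strip ((PySem.List.pyGet? (PySem.Chars.splitOn pair ['=']) 0).getD []))]
        else acc) []
  else []

-- ===== PORT B =====
-- the for-loop of Source B: state (out, key, seen_eq); final flush at end of string
def ecpLoop : List Char → List String → List Char → Bool → List String
  | [], out, key, seen =>
      if seen then out ++ [String.ofList ("cookie:".toList ++ PySem.Chars.strip key)] else out
  | c :: rest, out, key, seen =>
      if c = ';' then
        ecpLoop rest
          (if seen then out ++ [String.ofList ("cookie:".toList ++ PySem.Chars.strip key)] else out)
          [] false
      else if c = '=' then ecpLoop rest out key true
      else if !seen then ecpLoop rest out (key ++ [c]) seen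
      else ecpLoop rest out key seen

def extract_cookie_parameters_alt (headers : List (String × String)) : List String :=
  ecpLoop (PySem.Dict.getD (PySem.Dict.ofList headers) "Cookie" "").toList [] [] false

-- ===== PRECONDITION & SPEC =====
def Spec_extract_cookie_parameters (headers : List (String × String)) (out : List String) : Prop := out = extract_cookie_parameters_alt headers
instance (headers : List (String × String)) (out : List String) : Decidable (Spec_extract_cookie_parameters headers out) := by unfold Spec_extract_cookie_parameters; infer_instance

-- ===== CLAIM (what is proved, stated in full; the proofs are below) =====
def Claim_equal_extract_cookie_parameters : Prop := ∀ (headers : List (String × String)), Dom_extract_cookie_parameters headers → Spec_extract_cookie_parameters headers (extract_cookie_parameters headers)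

-- ===== LEMMAS AND PROOFS =====

-- the ';'-split (or '='-split) of a char list: (first piece, remaining pieces)
def splitC (sep : Char) : List Char → List Char × List (List Char)
  | [] => ([], [])
  | c :: r =>
    let p := splitC sep r
    if c = sep then ([], p.1 :: p.2) else (c :: p.1, p.2)

-- what A emits for one ';'-segment
def emitSeg (seg : List Char) : List String :=
  if PySem.Chars.isIn ['='] seg then
    [String.ofList ("cookie:".toList ++ PySem.Chars.strip (seg.takeWhile (fun c => c != '=')))]
  else []

lemma splitOn_go_singleton (sc : Char) :
    ∀ (fuel : Nat) (l cur : List Char) (acc : List (List Char)), l.length < fuel →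
      PySem.Chars.splitOn.go [sc] fuel l cur acc =
        acc.reverse ++ (cur.reverse ++ (splitC sc l).1) :: (splitC sc l).2 := by
  intro fuel
  induction fuel with
  | zero => intro l cur acc h; omega
  | succ n ih =>
    intro l cur acc h
    cases l with
    | nil => simp [PySem.Chars.splitOn.go, splitC]
    | cons c rest =>
      by_cases hc : c = sc
      · subst hc
        rw [show PySem.Chars.splitOn.go [c] (n+1) (c :: rest) cur acc
              = PySem.Chars.splitOn.go [c] n rest [] (cur.reverse :: acc) by
            simp [PySem.Chars.splitOn.go, List.isPrefixOf]]
        rw [ih rest [] (cur.reverse :: acc) (by simpa using Nat.lt_of_succ_lt_succ h)]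
        simp [splitC]
      · rw [show PySem.Chars.splitOn.go [sc] (n+1) (c :: rest) cur acc
              = PySem.Chars.splitOn.go [sc] n rest (c :: cur) acc by
            simp [PySem.Chars.splitOn.go, List.isPrefixOf, Ne.symm hc]]
        rw [ih rest (c :: cur) acc (by simpa using Nat.lt_of_succ_lt_succ h)]
        simp [splitC, hc]

lemma splitOn_singleton (sc : Char) (l : List Char) :
    PySem.Chars.splitOn l [sc] = (splitC sc l).1 :: (splitC sc l).2 := by
  unfold PySem.Chars.splitOn
  rw [splitOn_go_singleton sc (l.length + 1) l [] [] (by omega)]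
  simp

lemma splitC_fst_eq_takeWhile (sep : Char) :
    ∀ l : List Char, (splitC sep l).1 = l.takeWhile (fun c => c != sep) := by
  intro l
  induction l with
  | nil => simp [splitC]
  | cons c r ih =>
    by_cases hc : c = sep
    · subst hc; simp [splitC, List.takeWhile]
    · have hb : (c != sep) = true := by simp [hc]
      simp [splitC, hc, List.takeWhile, hb, ih]

-- A's per-segment value equals emitSeg
lemma foldA_eq_flatMap :
    ∀ (segs : List (List Char)) (acc : List String),
      segs.foldl
        (fun acc pair =>
          if PySem.Chars.isIn ['='] pair then
            acc ++ [String.ofList ("cookie:".toList ++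
              PySem.Chars.strip ((PySem.List.pyGet? (PySem.Chars.splitOn pair ['=']) 0).getD []))]
          else acc) acc = acc ++ segs.flatMap emitSeg := by
  intro segs
  induction segs with
  | nil => intro acc; simp
  | cons s t ih =>
    intro acc
    simp only [List.foldl_cons, List.flatMap_cons, ih]
    by_cases h : PySem.Chars.isIn ['='] s
    · simp [h, emitSeg, splitOn_singleton,
        splitC_fst_eq_takeWhile, List.append_assoc]
    · simp [h, emitSeg]

lemma takeWhile_append_of_no_eq {key l : List Char} (h : '=' ∉ key) :
    (key ++ l).takeWhile (fun c => c != '=') = key ++ l.takeWhile (fun c => c != '=') := by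
  induction key with
  | nil => simp
  | cons c r ih =>
    have hc : c ≠ '=' := fun hc => h (hc ▸ List.mem_cons_self)
    have hb : (c != '=') = true := by simp [hc]
    simp only [List.cons_append, List.takeWhile]
    simp [hb, ih (fun hm => h (List.mem_cons_of_mem _ hm))]

lemma mem_of_isIn_singleton {a : Char} {l : List Char} :
    PySem.Chars.isIn [a] l = true ↔ a ∈ l := by
  rw [PySem.Chars.isIn_iff_infix]; exact List.singleton_infix_iff a l

lemma ecpLoop_spec :
    ∀ (l : List Char) (out : List String) (key : List Char) (seen : Bool),
      (seen = false → '=' ∉ key) →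
      ecpLoop l out key seen =
        out ++
          (if seen then [String.ofList ("cookie:".toList ++ PySem.Chars.strip key)]
           else emitSeg (key ++ (splitC ';' l).1)) ++
          (splitC ';' l).2.flatMap emitSeg := by
  intro l
  induction l with
  | nil =>
    intro out key seen hk
    cases seen with
    | false =>
      have : '=' ∉ key := hk rfl
      have hno : PySem.Chars.isIn ['='] key = false := by
        rw [Bool.eq_false_iff]
        intro hc
        exact this (mem_of_isIn_singleton.mp hc)
      simp [ecpLoop, splitC, emitSeg, hno]
    | true => simp [ecpLoop, splitC]
  | cons c rest ih =>
    intro out key seen hk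
    by_cases hc : c = ';'
    · subst hc
      cases seen with
      | false =>
        have hkey := hk rfl
        have hno : PySem.Chars.isIn ['='] key = false := by
          rw [Bool.eq_false_iff]
          intro hcc
          exact hkey (mem_of_isIn_singleton.mp hcc)
        simp only [ecpLoop, Bool.false_eq_true, if_false]
        rw [ih out [] false (fun _ => List.not_mem_nil)]
        simp [splitC, emitSeg, hno]
      | true =>
        simp only [ecpLoop]
        rw [ih _ [] false (fun _ => List.not_mem_nil)]
        simp [splitC, emitSeg, List.append_assoc]
    · by_cases he : c = '='
      · subst he
        have hne : ('=' : Char) ≠ ';' := by decide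
        cases seen with
        | false =>
          have hkey := hk rfl
          simp only [ecpLoop, if_neg hne]
          rw [ih out key true (fun h => Bool.noConfusion h)]
          have hyes : PySem.Chars.isIn ['='] (key ++ '=' :: (splitC ';' rest).1) = true := by
            rw [mem_of_isIn_singleton]; simp
          simp [splitC, hne, emitSeg, hyes, takeWhile_append_of_no_eq hkey,
            List.takeWhile]
        | true =>
          simp only [ecpLoop, if_neg hne]
          rw [ih out key true (fun h => Bool.noConfusion h)]
          simp [splitC, hne]
      · cases seen with
        | false =>
          have hkey := hk rfl
          simp only [ecpLoop, if_neg hc, if_neg he, Bool.not_false]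
          rw [ih out (key ++ [c]) false
              (fun _ => by
                intro hm
                rcases List.mem_append.mp hm with h1 | h1
                · exact hkey h1
                · exact he (List.mem_singleton.mp h1).symm)]
          simp [splitC, hc, List.append_assoc]
        | true =>
          simp only [ecpLoop, if_neg hc, if_neg he, Bool.not_true, Bool.false_eq_true,
            if_false]
          rw [ih out key true (fun h => Bool.noConfusion h)]
          simp [splitC, hc]

-- ===== VERDICT (by name: the statement is the Claim_ definition above) =====
theorem extract_cookie_parameters_spec : Claim_equal_extract_cookie_parameters := by
  intro headers _
  unfold Spec_extract_cookie_parameters extract_cookie_parameters extract_cookie_parameters_alt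
  by_cases hc : PySem.Dict.getD (PySem.Dict.ofList headers) "Cookie" "" = ""
  · rw [hc]; simp [ecpLoop]
  · rw [if_pos hc]
    rw [ecpLoop_spec _ [] [] false (fun _ => List.not_mem_nil)]
    rw [splitOn_singleton ';' _, foldA_eq_flatMap]
    simp
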